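-- pv_equiv track=rewrite | github.com/cedricho/practice | aoc/2024/day17.py | try_val
-- ===== SOURCE A (Python) =====
-- def try_val(lookups, program, i, cur):
--   if i >= len(program): return cur
--   target = program[i]
--   for v in lookups[target]:
--     v_hi3, v_lo7 = v>>7, v%128
--     cur_hi7 = (cur>>(i*3))%128
--     if cur_hi7 != v_lo7: continue
--     try_cur = (v_hi3<<(i*3+7)) + cur
--     if res := try_val(lookups, program, i+1, try_cur): return res
--   return None
-- ===== SOURCE B (Python) =====
-- def try_val(lookups, program, i, cur):
--     n = len(program)
--     if i >= n:
--         return cur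
--     stack = [(i, cur)]
--     while stack:
--         j, c = stack.pop()
--         if j >= n:
--             if c:
--                 return c
--             continue
--         children = [(v >> 7 << (j * 3 + 7)) + c
--                     for v in lookups[program[j]]
--                     if (c >> (j * 3)) % 128 == v % 128]
--         for ch in reversed(children):
--             stack.append((j + 1, ch))
--     return None
-- ===== Notes on version B (the rewrite author's own statement) =====
-- stated objective: alternative
-- what changed: The recursive backtracking (one recursive call per program position, with a for-loop over candidates and walrus-truthiness early return) is replaced by an iterative depth-first search over an explicit stack of (index, value) frames that pushes matching children in reverse so they pop left-to-right; Pre_ excludes inputs where A raises (negative i: negative-shift ValueError; a reachable missing dict key: KeyError) and, slightly more strongly, programs with a missing key after position i even when backtracking never reaches it.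
-- outside the precondition, e.g. on try_val({0: []}, [0, 1], 0, 0): A returns None, B returns None; on try_val({5: []}, [5], -1, 0): A returns None, B returns None
import Mathlib
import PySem

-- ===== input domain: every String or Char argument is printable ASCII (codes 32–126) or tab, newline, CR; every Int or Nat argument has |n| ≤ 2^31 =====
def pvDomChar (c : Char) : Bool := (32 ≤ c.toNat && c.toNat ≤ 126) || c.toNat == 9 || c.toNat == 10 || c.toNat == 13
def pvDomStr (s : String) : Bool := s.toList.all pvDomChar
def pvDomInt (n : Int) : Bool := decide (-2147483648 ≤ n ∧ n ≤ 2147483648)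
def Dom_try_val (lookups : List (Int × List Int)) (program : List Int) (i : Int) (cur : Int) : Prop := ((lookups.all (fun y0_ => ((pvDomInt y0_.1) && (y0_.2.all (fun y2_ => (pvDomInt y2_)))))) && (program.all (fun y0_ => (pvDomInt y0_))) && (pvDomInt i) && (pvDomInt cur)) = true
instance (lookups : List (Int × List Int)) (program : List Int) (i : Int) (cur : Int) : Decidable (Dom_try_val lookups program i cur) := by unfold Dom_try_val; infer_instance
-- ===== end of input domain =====

-- B replaces A's recursive backtracking by an iterative DFS over an explicit stack of (index, value) frames (alternative decomposition, same cost).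

-- ===== PORT A =====
-- A, transliterated: mutual recursion between the function body and its `for v in lookups[target]` loop.
-- The fuel argument is only a totality guard: each recursive body call increases i by 1, so the fuel
-- chosen in `try_val` below never runs out.
mutual
def tvA (fuel : Nat) (lookups : List (Int × List Int)) (program : List Int) (i : Int) (cur : Int) : Option Int :=
  match fuel with
  | 0 => none
  | Nat.succ f =>
    if (program.length : Int) ≤ i then some cur
    else
      match PySem.List.pyGet? program i with
      | none => none          -- IndexError
      | some target =>
        match (PySem.Dict.mk lookups).get? target with
        | none => none        -- KeyError
        | some vs => tvLoopA f lookups program i cur vs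
termination_by (fuel, 0)

def tvLoopA (fuel : Nat) (lookups : List (Int × List Int)) (program : List Int) (i : Int) (cur : Int) (vs : List Int) : Option Int :=
  match vs with
  | [] => none
  | v :: rest =>
    let v_hi3 := v >>> (7 : Nat)
    let v_lo7 := PySem.Int.mod v 128
    let cur_hi7 := PySem.Int.mod (cur >>> (3 * i).toNat) 128   -- .toNat: Python raises on a negative shift count (excluded by Pre_)
    if cur_hi7 ≠ v_lo7 then tvLoopA fuel lookups program i cur rest
    else
      let try_cur := (v_hi3 <<< ((3 * i).toNat + 7)) + cur
      match tvA fuel lookups program (i + 1) try_cur with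
      | some r => if r = 0 then tvLoopA fuel lookups program i cur rest else some r   -- `if res := …:` walrus truthiness
      | none => tvLoopA fuel lookups program i cur rest
termination_by (fuel, vs.length + 1)
end

def try_val (lookups : List (Int × List Int)) (program : List Int) (i : Int) (cur : Int) : Option Int :=
  tvA (((program.length : Int) - i).toNat + 1) lookups program i cur

-- ===== PORT B =====
-- matching children of a frame (j, c): the list comprehension in Source B
def childrenB (lookups : List (Int × List Int)) (j c : Int) (vs : List Int) : List Int :=
  (vs.filter (fun v => PySem.Int.mod (c >>> (3 * j).toNat) 128 == PySem.Int.mod v 128)).map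
    (fun v : Int => ((v >>> (7 : Nat)) <<< ((3 * j).toNat + 7)) + c)

-- the `while stack:` loop; the list head is the stack top, children are pushed so that they pop
-- left to right.  fuel is only a totality guard for the while loop (see fuelB).
def dfsB (lookups : List (Int × List Int)) (program : List Int) : Nat → List (Int × Int) → Option Int
  | _, [] => none
  | 0, _ :: _ => none
  | Nat.succ f, (j, c) :: rest =>
    if (program.length : Int) ≤ j then
      if c = 0 then dfsB lookups program f rest else some c
    else
      match PySem.List.pyGet? program j with
      | none => none          -- IndexError
      | some target =>
        match (PySem.Dict.mk lookups).get? target with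
        | none => none        -- KeyError
        | some vs =>
          dfsB lookups program f (((childrenB lookups j c vs).map (fun ch => (j + 1, ch))) ++ rest)

-- fuel bound for the while loop: a frame at index j roots a tree of at most (K+1)^((n-j)+1) frames,
-- where K bounds every children list.
def maxKids (lookups : List (Int × List Int)) : Nat := (lookups.map (fun kv => kv.2.length)).sum

def fuelB (lookups : List (Int × List Int)) (program : List Int) (i : Int) : Nat :=
  (maxKids lookups + 1) ^ (((program.length : Int) - i).toNat + 1)

def try_val_alt (lookups : List (Int × List Int)) (program : List Int) (i : Int) (cur : Int) : Option Int :=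
  if (program.length : Int) ≤ i then some cur
  else dfsB lookups program (fuelB lookups program i) [(i, cur)]

-- ===== PRECONDITION & SPEC =====
-- Pre_ excludes inputs where A raises (negative i: negative-shift ValueError / negative indexing;
-- a missing dict key reachable from index i: KeyError); requiring every key from index i onward to be
-- present is slightly stronger than A needs when a missing key is never reached (see claim cites).
def Pre_try_val (lookups : List (Int × List Int)) (program : List Int) (i : Int) (cur : Int) : Prop :=
  (program.length : Int) ≤ i ∨
    (0 ≤ i ∧ ∀ x ∈ program.drop i.toNat, ((PySem.Dict.mk lookups).get? x).isSome)
instance (lookups : List (Int × List Int)) (program : List Int) (i : Int) (cur : Int) : Decidable (Pre_try_val lookups program i cur) := by unfold Pre_try_val; infer_instance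

def pvWitness_try_val : (List (Int × List Int)) × List Int × Int × Int := ([(0, [0, 131])], [0], 0, 0)

def Spec_try_val (lookups : List (Int × List Int)) (program : List Int) (i : Int) (cur : Int) (out : Option Int) : Prop := out = try_val_alt lookups program i cur
instance (lookups : List (Int × List Int)) (program : List Int) (i : Int) (cur : Int) (out : Option Int) : Decidable (Spec_try_val lookups program i cur out) := by unfold Spec_try_val; infer_instance

-- ===== CLAIM (what is proved, stated in full; the proofs are below) =====
def Claim_equal_try_val : Prop := ∀ (lookups : List (Int × List Int)) (program : List Int) (i : Int) (cur : Int), Dom_try_val lookups program i cur → Pre_try_val lookups program i cur → Spec_try_val lookups program i cur (try_val lookups program i cur)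

-- ===== LEMMAS AND PROOFS =====

-- the value a single frame contributes: a completed frame counts only if nonzero (walrus truthiness);
-- an incomplete frame contributes A's result.
def gsem (lookups : List (Int × List Int)) (program : List Int) (j c : Int) : Option Int :=
  if (program.length : Int) ≤ j then (if c = 0 then none else some c)
  else try_val lookups program j c

def firstG (lookups : List (Int × List Int)) (program : List Int) : List (Int × Int) → Option Int
  | [] => none
  | (j, c) :: rest =>
    match gsem lookups program j c with
    | some r => some r
    | none => firstG lookups program rest

def wt (lookups : List (Int × List Int)) (program : List Int) (j : Int) : Nat :=
  (maxKids lookups + 1) ^ (((program.length : Int) - j).toNat + 1)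

def stackW (lookups : List (Int × List Int)) (program : List Int) (st : List (Int × Int)) : Nat :=
  (st.map (fun f => wt lookups program f.1)).sum

theorem tvLoopA_ne_zero (f : Nat) (lookups : List (Int × List Int)) (program : List Int) (i cur : Int)
    (vs : List Int) : tvLoopA f lookups program i cur vs ≠ some 0 := by
  induction vs with
  | nil => simp [tvLoopA]
  | cons v rest ih =>
    rw [tvLoopA]
    dsimp only
    split_ifs with h1
    · exact ih
    · cases htv : tvA f lookups program (i + 1) ((v >>> (7:Nat) <<< ((3*i).toNat + 7)) + cur) with
      | none => simpa [htv] using ih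
      | some r =>
        by_cases hr : r = 0
        · simpa [htv, hr] using ih
        · simp [htv, hr]

theorem try_val_ne_zero (lookups : List (Int × List Int)) (program : List Int) (i cur : Int)
    (h : i < (program.length : Int)) : try_val lookups program i cur ≠ some 0 := by
  rw [try_val, tvA]
  rw [if_neg (by omega)]
  cases PySem.List.pyGet? program i with
  | none => simp
  | some target =>
    cases hg : (PySem.Dict.mk lookups).get? target with
    | none => simp [hg]
    | some vs =>
      simp only [hg]
      exact tvLoopA_ne_zero ((program.length : Int) - i).toNat lookups program i cur vs

theorem firstG_append (lookups : List (Int × List Int)) (program : List Int) (a b : List (Int × Int)) :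
    firstG lookups program (a ++ b) =
      match firstG lookups program a with
      | some r => some r
      | none => firstG lookups program b := by
  induction a with
  | nil => simp [firstG]
  | cons f rest ih =>
    obtain ⟨j, c⟩ := f
    rw [List.cons_append, firstG, firstG]
    cases gsem lookups program j c <;> simp [ih]

-- A's loop computes the first accepted completion among the frame's children, in order.
theorem loopA_eq_firstG (lookups : List (Int × List Int)) (program : List Int) (j c : Int)
    (hj : j < (program.length : Int)) (vs : List Int) :
    tvLoopA ((program.length : Int) - j).toNat lookups program j c vs =
      firstG lookups program ((childrenB lookups j c vs).map (fun ch => (j + 1, ch))) := by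
  induction vs with
  | nil => simp [tvLoopA, childrenB, firstG]
  | cons v rest ih =>
    rw [tvLoopA]
    dsimp only
    by_cases h1 : PySem.Int.mod (c >>> (3*j).toNat) 128 = PySem.Int.mod v 128
    · rw [if_neg (by simpa using h1)]
      have hfuel : ((program.length : Int) - j).toNat = ((program.length : Int) - (j + 1)).toNat + 1 := by omega
      have htv : tvA ((program.length : Int) - j).toNat lookups program (j + 1)
          ((v >>> (7:Nat) <<< ((3*j).toNat + 7)) + c) =
          try_val lookups program (j + 1) ((v >>> (7:Nat) <<< ((3*j).toNat + 7)) + c) := by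
        rw [try_val, hfuel]
      have hch : childrenB lookups j c (v :: rest) =
          (((v >>> (7:Nat)) <<< ((3*j).toNat + 7)) + c) :: childrenB lookups j c rest := by
        simp only [childrenB, List.filter_cons]
        rw [if_pos (by simpa using h1), List.map_cons]
      rw [hch, List.map_cons, firstG]
      set ch := ((v >>> (7:Nat)) <<< ((3*j).toNat + 7)) + c with hchdef
      by_cases h2 : (program.length : Int) ≤ j + 1
      · -- child frame is complete: A's recursive call returns `some ch`, accepted iff ch ≠ 0
        have : try_val lookups program (j + 1) ch = some ch := by
          rw [try_val, tvA]; simp [h2]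
        rw [htv] at *
        rw [this]
        by_cases hz : ch = 0
        · simp [gsem, h2, hz, ih]
        · simp [gsem, h2, hz]
      · -- child frame incomplete: gsem is A's value there, never some 0
        have hg : gsem lookups program (j + 1) ch = try_val lookups program (j + 1) ch := by
          simp [gsem, h2]
        rw [htv, hg]
        cases hres : try_val lookups program (j + 1) ch with
        | none => simp [ih]
        | some r =>
          have : r ≠ 0 := by
            intro h0; subst h0
            exact try_val_ne_zero lookups program (j + 1) ch (by omega) hres
          simp [this]
    · rw [if_pos (by simpa using h1)]
      have hch : childrenB lookups j c (v :: rest) = childrenB lookups j c rest := by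
        simp only [childrenB, List.filter_cons]
        rw [if_neg (by simpa using h1)]
      rw [hch]; exact ih

theorem get?_len_le_maxKids (lookups : List (Int × List Int)) (x : Int) (vs : List Int)
    (h : (PySem.Dict.mk lookups).get? x = some vs) : vs.length ≤ maxKids lookups := by
  induction lookups with
  | nil => simp [PySem.Dict.get?] at h
  | cons kv rest ih =>
    rw [PySem.Dict.get?_mk_cons] at h
    by_cases hk : kv.1 == x
    · rw [if_pos hk] at h
      cases h
      simp [maxKids]
    · rw [if_neg hk] at h
      have := ih h
      simp [maxKids] at this ⊢
      omega

theorem dfsB_eq_firstG (lookups : List (Int × List Int)) (program : List Int) :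
    ∀ (fuel : Nat) (st : List (Int × Int)),
      (∀ f ∈ st, 0 ≤ f.1 ∧ ∀ x ∈ program.drop f.1.toNat, ((PySem.Dict.mk lookups).get? x).isSome) →
      stackW lookups program st ≤ fuel →
      dfsB lookups program fuel st = firstG lookups program st := by
  intro fuel
  induction fuel with
  | zero =>
    intro st hinv hw
    cases st with
    | nil => simp [dfsB, firstG]
    | cons f rest =>
      exfalso
      have : 1 ≤ wt lookups program f.1 := Nat.one_le_iff_ne_zero.mpr (by simp [wt])
      simp [stackW] at hw
      omega
  | succ f ihf =>
    intro st hinv hw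
    cases st with
    | nil => simp [dfsB, firstG]
    | cons fr rest =>
      obtain ⟨j, c⟩ := fr
      have hfr := hinv (j, c) (by simp)
      obtain ⟨hj0, hkeys⟩ := hfr
      have hrestinv : ∀ f ∈ rest, 0 ≤ f.1 ∧ ∀ x ∈ program.drop f.1.toNat, ((PySem.Dict.mk lookups).get? x).isSome := by
        intro g hg; exact hinv g (by simp [hg])
      have hwt1 : 1 ≤ wt lookups program j := Nat.one_le_iff_ne_zero.mpr (by simp [wt])
      have hwcons : stackW lookups program ((j, c) :: rest) = wt lookups program j + stackW lookups program rest := by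
        simp [stackW]
      by_cases hend : (program.length : Int) ≤ j
      · rw [dfsB, if_pos hend, firstG]
        by_cases hz : c = 0
        · rw [if_pos hz]
          have : gsem lookups program j c = none := by simp [gsem, hend, hz]
          rw [this]
          exact ihf rest hrestinv (by omega)
        · rw [if_neg hz]
          have : gsem lookups program j c = some c := by simp [gsem, hend, hz]
          rw [this]
      · push_neg at hend
        have hjlt : j.toNat < program.length := by omega
        have hget : PySem.List.pyGet? program j = some program[j.toNat] :=
          PySem.List.pyGet?_eq_some_getElem program (by simpa using hj0) (by omega)
        have hmem : program[j.toNat] ∈ program.drop j.toNat := by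
          rw [← List.getElem_cons_drop hjlt]
          exact List.mem_cons_self
        have hvs := hkeys _ hmem
        obtain ⟨vs, hvs⟩ := Option.isSome_iff_exists.mp hvs
        rw [dfsB, if_neg (by omega)]
        simp only [hget, hvs]
        -- fuel accounting
        have hlen : (childrenB lookups j c vs).length ≤ maxKids lookups := by
          have h1 : (childrenB lookups j c vs).length ≤ vs.length := by
            simp [childrenB]
            exact List.length_filter_le _ _
          exact le_trans h1 (get?_len_le_maxKids lookups _ vs hvs)
        have hwj : wt lookups program j = (maxKids lookups + 1) * wt lookups program (j + 1) := by
          have : (((program.length : Int) - j).toNat + 1) = (((program.length : Int) - (j + 1)).toNat + 1) + 1 := by omega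
          rw [wt, wt, this, pow_succ]
          ring
        have hwch : stackW lookups program ((childrenB lookups j c vs).map (fun ch => (j + 1, ch))) =
            (childrenB lookups j c vs).length * wt lookups program (j + 1) := by
          simp only [stackW, List.map_map, Function.comp_def]
          rw [List.map_const']
          simp [List.sum_replicate, smul_eq_mul, Nat.mul_comm]
        have hwt1' : 1 ≤ wt lookups program (j + 1) := Nat.one_le_iff_ne_zero.mpr (by simp [wt])
        have hfuel : stackW lookups program (((childrenB lookups j c vs).map (fun ch => (j + 1, ch))) ++ rest) ≤ f := by
          rw [stackW, List.map_append, List.sum_append, ← stackW, ← stackW, hwch]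
          have : (childrenB lookups j c vs).length * wt lookups program (j + 1) + 1 ≤ wt lookups program j := by
            rw [hwj]
            have := Nat.mul_le_mul_right (wt lookups program (j + 1)) hlen
            nlinarith
          omega
        have hchinv : ∀ g ∈ ((childrenB lookups j c vs).map (fun ch => (j + 1, ch))) ++ rest,
            0 ≤ g.1 ∧ ∀ x ∈ program.drop g.1.toNat, ((PySem.Dict.mk lookups).get? x).isSome := by
          intro g hg
          rw [List.mem_append] at hg
          cases hg with
          | inr h => exact hrestinv g h
          | inl h =>
            rw [List.mem_map] at h
            obtain ⟨ch, _, rfl⟩ := h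
            refine ⟨by omega, ?_⟩
            intro x hx
            apply hkeys
            have hdd : program.drop (j + 1).toNat = (program.drop j.toNat).drop 1 := by
              rw [List.drop_drop]
              congr 1
              omega
            rw [hdd] at hx
            exact List.drop_subset _ _ hx
        rw [ihf _ hchinv hfuel, firstG_append]
        -- A's unfolding on the frame (j, c)
        have hun : gsem lookups program j c =
            firstG lookups program ((childrenB lookups j c vs).map (fun ch => (j + 1, ch))) := by
          rw [gsem, if_neg (by omega), try_val, tvA]
          rw [if_neg (by omega)]
          simp only [hget, hvs]
          exact loopA_eq_firstG lookups program j c hend vs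
        rw [firstG, hun]

-- ===== VERDICT (by name: the statement is the Claim_ definition above) =====
theorem try_val_spec : Claim_equal_try_val := by
  intro lookups program i cur _ hpre
  unfold Spec_try_val try_val_alt
  by_cases hend : (program.length : Int) ≤ i
  · rw [if_pos hend, try_val, tvA]
    simp [hend]
  · rw [if_neg hend]
    push_neg at hend
    rcases hpre with h | ⟨hi0, hkeys⟩
    · omega
    · have := dfsB_eq_firstG lookups program (fuelB lookups program i) [(i, cur)]
        (by intro f hf; simp at hf; obtain ⟨rfl, rfl⟩ := hf; exact ⟨hi0, hkeys⟩)
        (by simp [stackW, wt, fuelB])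
      rw [this, firstG]
      have hg : gsem lookups program i cur = try_val lookups program i cur := by
        simp [gsem, hend.not_ge]
      rw [hg]
      cases try_val lookups program i cur <;> simp [firstG]
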